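-- pv_equiv track=rewrite | github.com/GlenPrideaux/OT_parallel | scripts/01_update_brenton.py | split_preserving_footnotes
-- ===== SOURCE A (Python) =====
-- from typing import Dict, List, Pattern, Tuple
--
-- def split_preserving_footnotes(line: str) -> List[Tuple[bool, str]]:
--     """
--     Split a line into segments:
--       (True, text)  = footnote segment (skip modernising)
--       (False, text) = normal segment (modernise)
--     Handles multiple footnotes in one line.
--     """
--     parts: List[Tuple[bool, str]] = []
--     pos = 0
--
--     while True:
--         start = line.find(r"\f ", pos)
--         if start == -1:
--             parts.append((False, line[pos:]))
--             break
--
--         if start > pos: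
--             parts.append((False, line[pos:start]))
--
--         end = line.find(r"\f*", start)
--         if end == -1:
--             # Unterminated footnote: treat rest of line as footnote
--             parts.append((True, line[start:]))
--             break
--
--         end += len(r"\f*")
--         parts.append((True, line[start:end]))
--         pos = end
--
--     return parts
-- ===== SOURCE B (Python) =====
-- def split_preserving_footnotes(line):
--     """
--     Single left-to-right character scan with a two-state machine
--     (normal / inside-footnote) instead of repeated str.find calls.
--     """
--     parts = []
--     buf = []
--     mode = False  # inside a footnote?
--     i = 0
--     n = len(line)
--     while i < n:
--         if not mode and line.startswith("\\f ", i):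
--             if buf:
--                 parts.append((False, "".join(buf)))
--             buf = ["\\f "]
--             mode = True
--             i += 3
--         elif mode and line.startswith("\\f*", i):
--             buf.append("\\f*")
--             parts.append((True, "".join(buf)))
--             buf = []
--             mode = False
--             i += 3
--         else:
--             buf.append(line[i])
--             i += 1
--     parts.append((mode, "".join(buf)))
--     return parts
-- ===== Notes on version B (the rewrite author's own statement) =====
-- stated objective: alternative
-- what changed: A repeatedly calls str.find for '\f ' and '\f*' and slices segments out of the line; B makes a single left-to-right character scan with a two-state machine (normal / inside-footnote) and a character buffer, never calling find or slicing.
import Mathlib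
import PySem

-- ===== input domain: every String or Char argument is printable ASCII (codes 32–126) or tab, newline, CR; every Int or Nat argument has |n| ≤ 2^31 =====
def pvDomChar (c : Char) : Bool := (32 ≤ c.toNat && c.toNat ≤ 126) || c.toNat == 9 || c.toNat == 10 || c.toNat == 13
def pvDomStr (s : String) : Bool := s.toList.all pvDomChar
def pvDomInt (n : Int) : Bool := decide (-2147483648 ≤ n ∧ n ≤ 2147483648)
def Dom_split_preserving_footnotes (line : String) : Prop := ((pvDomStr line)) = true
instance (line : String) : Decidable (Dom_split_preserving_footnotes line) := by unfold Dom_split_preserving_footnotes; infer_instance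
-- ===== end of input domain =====

-- B replaces A's repeated str.find/slice loop by a single left-to-right character
-- scan with a two-state machine (normal / inside-footnote) and a character buffer
-- (objective: alternative, same cost; return values proved identical).

-- ===== PORT A =====
-- termination/bounds fact for A's while-loop (pos strictly increases, stays ≤ len)
theorem goA_bounds (l sub1 sub2 : List Char) (h1 : sub1.length = 3) (h2 : sub2.length = 3)
    (pos : Nat) (hpos : pos ≤ l.length)
    (hs : PySem.Chars.findFrom l sub1 (pos : Int) none ≠ -1)
    (he : PySem.Chars.findFrom l sub2 (PySem.Chars.findFrom l sub1 (pos : Int) none) none ≠ -1) :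
    pos < (PySem.Chars.findFrom l sub2 (PySem.Chars.findFrom l sub1 (pos : Int) none) none + 3).toNat ∧
    (PySem.Chars.findFrom l sub2 (PySem.Chars.findFrom l sub1 (pos : Int) none) none + 3).toNat ≤ l.length := by
  obtain ⟨hks, hpre1, -⟩ := PySem.Chars.findFrom_natCast_spec l sub1 pos hpos hs
  set s := PySem.Chars.findFrom l sub1 (pos : Int) none with hsdef
  have hs0 : 0 ≤ s := le_trans (by exact_mod_cast Int.natCast_nonneg pos) hks
  have hslen : s.toNat + 3 ≤ l.length := by
    have := hpre1.length_le
    simp [List.length_drop, h1] at this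
    omega
  have hcast : s = ((s.toNat : Nat) : Int) := by omega
  rw [hcast] at he
  obtain ⟨hke, hpre2, -⟩ := PySem.Chars.findFrom_natCast_spec l sub2 s.toNat (by omega) he
  set e := PySem.Chars.findFrom l sub2 ((s.toNat : Nat) : Int) none with hedef
  have he0 : 0 ≤ e := le_trans (by exact_mod_cast Int.natCast_nonneg s.toNat) hke
  have helen : e.toNat + 3 ≤ l.length := by
    have := hpre2.length_le
    simp [List.length_drop, h2] at this
    omega
  rw [hcast]
  constructor
  · omega
  · omega

def goA (line : String) (pos : Nat) (hpos : pos ≤ line.toList.length)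
    (parts : List (Bool × String)) : List (Bool × String) :=
  let start := PySem.Str.findFrom line "\\f " (pos : Int)
  if hs : start = -1 then
    parts ++ [(false, PySem.Str.slice line (some (pos : Int)) none)]
  else
    let parts₁ := if (pos : Int) < start then
        parts ++ [(false, PySem.Str.slice line (some (pos : Int)) (some start))]
      else parts
    let e := PySem.Str.findFrom line "\\f*" start
    if he : e = -1 then
      parts₁ ++ [(true, PySem.Str.slice line (some start) none)]
    else
      let e3 := e + 3
      goA line e3.toNat
        (by
          have h := goA_bounds line.toList "\\f ".toList "\\f*".toList (by decide) (by decide)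
            pos hpos (by simpa [start] using hs) (by simpa [e, start] using he)
          simpa [e3, e, start] using h.2)
        (parts₁ ++ [(true, PySem.Str.slice line (some start) (some e3))])
  termination_by line.toList.length - pos
  decreasing_by
    have h := goA_bounds line.toList "\\f ".toList "\\f*".toList (by decide) (by decide)
      pos hpos (by simpa [start] using hs) (by simpa [e, start] using he)
    obtain ⟨h1, h2⟩ := h
    simp only [PySem.Str.findFrom_eq]
    omega

def split_preserving_footnotes (line : String) : List (Bool × String) :=
  goA line 0 (Nat.zero_le _) []

-- ===== PORT B =====
def goB : List Char → List Char → Bool → List (Bool × String) → List (Bool × String)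
  | [], buf, mode, parts => parts ++ [(mode, String.ofList buf)]
  | c :: r, buf, mode, parts =>
    if mode = false ∧ PySem.Chars.startswith (c :: r) ['\\', 'f', ' '] = true then
      goB (r.drop 2) ['\\', 'f', ' '] true
        (if buf ≠ [] then parts ++ [(false, String.ofList buf)] else parts)
    else if mode = true ∧ PySem.Chars.startswith (c :: r) ['\\', 'f', '*'] = true then
      goB (r.drop 2) [] false (parts ++ [(true, String.ofList (buf ++ ['\\', 'f', '*']))])
    else
      goB r (buf ++ [c]) mode parts
  termination_by s => s.length
  decreasing_by
    all_goals simp [List.length_drop]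

def split_preserving_footnotes_alt (line : String) : List (Bool × String) :=
  goB line.toList [] false []

-- ===== PRECONDITION & SPEC =====
def Spec_split_preserving_footnotes (line : String) (out : List (Bool × String)) : Prop := out = split_preserving_footnotes_alt line
instance (line : String) (out : List (Bool × String)) : Decidable (Spec_split_preserving_footnotes line out) := by unfold Spec_split_preserving_footnotes; infer_instance

-- ===== CLAIM (what is proved, stated in full; the proofs are below) =====
def Claim_equal_split_preserving_footnotes : Prop := ∀ (line : String), Dom_split_preserving_footnotes line → Spec_split_preserving_footnotes line (split_preserving_footnotes line)

-- ===== LEMMAS AND PROOFS =====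
theorem find_eq_of_first (s sub : List Char) (j : Nat) (hj : sub <+: s.drop j)
    (hmin : ∀ i < j, ¬ sub <+: s.drop i) : PySem.Chars.find s sub = (j : Int) := by
  have hin : sub <:+: s := by
    rw [← PySem.Chars.isIn_iff_infix, ← PySem.Chars.exists_prefix_drop_iff_isIn]
    exact ⟨j, hj⟩
  have h0 : 0 ≤ PySem.Chars.find s sub := (PySem.Chars.find_nonneg_iff s sub).mpr hin
  obtain ⟨hpre, hm⟩ := PySem.Chars.find_spec h0
  have : (PySem.Chars.find s sub).toNat = j := by
    rcases lt_trichotomy (PySem.Chars.find s sub).toNat j with h | h | h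
    · exact absurd hpre (hmin _ h)
    · exact h
    · exact absurd hj (hm _ h)
  omega

theorem find_cons_of_not_prefix (c : Char) (s sub : List Char) (h : ¬ sub <+: c :: s) :
    PySem.Chars.find (c :: s) sub =
      if PySem.Chars.find s sub = -1 then -1 else PySem.Chars.find s sub + 1 := by
  by_cases hin : sub <:+: s
  · have h0 : 0 ≤ PySem.Chars.find s sub := (PySem.Chars.find_nonneg_iff s sub).mpr hin
    obtain ⟨hpre, hm⟩ := PySem.Chars.find_spec h0
    have hne : PySem.Chars.find s sub ≠ -1 := by omega
    rw [if_neg hne]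
    have := find_eq_of_first (c :: s) sub ((PySem.Chars.find s sub).toNat + 1)
      (by simpa using hpre)
      (by
        intro i hi
        cases i with
        | zero => simpa using h
        | succ i => simpa using hm i (by omega))
    omega
  · have h1 : PySem.Chars.find s sub = -1 := (PySem.Chars.find_eq_neg_one_iff s sub).mpr hin
    rw [if_pos h1, PySem.Chars.find_eq_neg_one_iff, List.infix_cons_iff]
    tauto

theorem goB_normal (s : List Char) : ∀ (buf : List Char) (parts : List (Bool × String)),
    goB s buf false parts =
      if PySem.Chars.find s ['\\','f',' '] = -1 then
        parts ++ [(false, String.ofList (buf ++ s))]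
      else
        goB (s.drop ((PySem.Chars.find s ['\\','f',' ']).toNat + 3)) ['\\','f',' '] true
          (if buf ++ s.take (PySem.Chars.find s ['\\','f',' ']).toNat = [] then parts
           else parts ++ [(false, String.ofList (buf ++ s.take (PySem.Chars.find s ['\\','f',' ']).toNat))]) := by
  induction s with
  | nil =>
    intro buf parts
    have : PySem.Chars.find ([] : List Char) ['\\','f',' '] = -1 := by decide
    simp [goB, this]
  | cons c s' ih =>
    intro buf parts
    by_cases hp : ['\\','f',' '] <+: c :: s'
    · obtain ⟨t, ht⟩ := hp
      have hc : c = '\\' ∧ s' = 'f' :: ' ' :: t := by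
        simp at ht
        exact ⟨ht.1.symm, ht.2.symm⟩
      obtain ⟨rfl, rfl⟩ := hc
      have hf : PySem.Chars.find ('\\' :: 'f' :: ' ' :: t) ['\\','f',' '] = 0 := by
        have := find_eq_of_first ('\\' :: 'f' :: ' ' :: t) ['\\','f',' '] 0 (by simp) (by omega)
        simpa using this
      rw [goB, hf]
      simp only [show ((0:Int)).toNat = 0 from rfl, List.take_zero, List.append_nil]
      have hsw : PySem.Chars.startswith ('\\' :: 'f' :: ' ' :: t) ['\\','f',' '] = true := by
        rw [PySem.Chars.startswith_iff]; exact ⟨t, rfl⟩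
      simp [hsw]
    · have hfc := find_cons_of_not_prefix c s' ['\\','f',' '] hp
      have hstep : goB (c :: s') buf false parts = goB s' (buf ++ [c]) false parts := by
        rw [goB]
        have hsw : PySem.Chars.startswith (c :: s') ['\\','f',' '] = false := by
          rw [← Bool.not_eq_true, PySem.Chars.startswith_iff]; exact hp
        simp [hsw]
      rw [hstep, ih]
      by_cases h1 : PySem.Chars.find s' ['\\','f',' '] = -1
      · rw [if_pos h1]
        rw [hfc, if_pos h1, if_pos rfl]
        simp
      · have h0 : 0 ≤ PySem.Chars.find s' ['\\','f',' '] := by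
          have := PySem.Chars.neg_one_le_find s' ['\\','f',' ']; omega
        have hne2 : ¬ (PySem.Chars.find s' ['\\','f',' '] + 1 = -1) := by omega
        rw [if_neg h1, hfc]
        simp only [if_neg h1, if_neg hne2]
        have htn : (PySem.Chars.find s' ['\\','f',' '] + 1).toNat
            = (PySem.Chars.find s' ['\\','f',' ']).toNat + 1 := by omega
        rw [htn]
        simp only [List.drop_succ_cons, List.take_succ_cons]
        congr 1
        simp

theorem goB_footnote (s : List Char) : ∀ (buf : List Char) (parts : List (Bool × String)),
    goB s buf true parts =
      if PySem.Chars.find s ['\\','f','*'] = -1 then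
        parts ++ [(true, String.ofList (buf ++ s))]
      else
        goB (s.drop ((PySem.Chars.find s ['\\','f','*']).toNat + 3)) [] false
          (parts ++ [(true, String.ofList (buf ++ s.take ((PySem.Chars.find s ['\\','f','*']).toNat + 3)))]) := by
  induction s with
  | nil =>
    intro buf parts
    have : PySem.Chars.find ([] : List Char) ['\\','f','*'] = -1 := by decide
    simp [goB, this]
  | cons c s' ih =>
    intro buf parts
    by_cases hp : ['\\','f','*'] <+: c :: s'
    · obtain ⟨t, ht⟩ := hp
      have hc : c = '\\' ∧ s' = 'f' :: '*' :: t := by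
        simp at ht
        exact ⟨ht.1.symm, ht.2.symm⟩
      obtain ⟨rfl, rfl⟩ := hc
      have hf : PySem.Chars.find ('\\' :: 'f' :: '*' :: t) ['\\','f','*'] = 0 := by
        have := find_eq_of_first ('\\' :: 'f' :: '*' :: t) ['\\','f','*'] 0 (by simp) (by omega)
        simpa using this
      rw [goB, hf]
      have hsw : PySem.Chars.startswith ('\\' :: 'f' :: '*' :: t) ['\\','f','*'] = true := by
        rw [PySem.Chars.startswith_iff]; exact ⟨t, rfl⟩
      simp [hsw]
    · have hfc := find_cons_of_not_prefix c s' ['\\','f','*'] hp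
      have hstep : goB (c :: s') buf true parts = goB s' (buf ++ [c]) true parts := by
        rw [goB]
        have hsw : PySem.Chars.startswith (c :: s') ['\\','f','*'] = false := by
          rw [← Bool.not_eq_true, PySem.Chars.startswith_iff]; exact hp
        simp [hsw]
      rw [hstep, ih]
      by_cases h1 : PySem.Chars.find s' ['\\','f','*'] = -1
      · rw [if_pos h1]
        rw [hfc, if_pos h1, if_pos rfl]
        simp
      · have h0 : 0 ≤ PySem.Chars.find s' ['\\','f','*'] := by
          have := PySem.Chars.neg_one_le_find s' ['\\','f','*']; omega
        have hne2 : ¬ (PySem.Chars.find s' ['\\','f','*'] + 1 = -1) := by omega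
        rw [if_neg h1, hfc]
        simp only [if_neg h1, if_neg hne2]
        have htn : (PySem.Chars.find s' ['\\','f','*'] + 1).toNat
            = (PySem.Chars.find s' ['\\','f','*']).toNat + 1 := by omega
        rw [htn]
        simp only [List.drop_succ_cons, List.take_succ_cons]
        congr 1
        simp

theorem find_fc_after_fo (t : List Char) :
    PySem.Chars.find ('\\' :: 'f' :: ' ' :: t) ['\\','f','*'] =
      if PySem.Chars.find t ['\\','f','*'] = -1 then -1
      else PySem.Chars.find t ['\\','f','*'] + 3 := by
  rw [find_cons_of_not_prefix _ _ _ (by simp [List.cons_prefix_cons]),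
      find_cons_of_not_prefix _ _ _ (by simp [List.cons_prefix_cons]),
      find_cons_of_not_prefix _ _ _ (by simp [List.cons_prefix_cons])]
  have h0 := PySem.Chars.neg_one_le_find t ['\\','f','*']
  by_cases h : PySem.Chars.find t ['\\','f','*'] = -1
  · simp [h]
  · rw [if_neg h, if_neg (by omega), if_neg (by omega), if_neg (by omega)]
    ring

theorem slice_from_eq (line : String) (k : Nat) :
    PySem.Str.slice line (some (k : Int)) none = String.ofList (line.toList.drop k) := by
  apply String.toList_inj.mp
  rw [PySem.Str.toList_slice, PySem.Chars.slice_eq_listSlice,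
      PySem.List.slice_from _ (Int.natCast_nonneg k)]
  simp

theorem slice_between_eq (line : String) (a b : Nat) :
    PySem.Str.slice line (some (a : Int)) (some (b : Int)) =
      String.ofList ((line.toList.drop a).take (b - a)) := by
  apply String.toList_inj.mp
  rw [PySem.Str.toList_slice, PySem.Chars.slice_eq_listSlice, PySem.List.slice_natCast]
  simp

theorem goA_congr (line : String) (k1 k2 : Nat) (h1 : k1 ≤ line.toList.length)
    (h2 : k2 ≤ line.toList.length) (p1 p2 : List (Bool × String))
    (hk : k1 = k2) (hp : p1 = p2) : goA line k1 h1 p1 = goA line k2 h2 p2 := by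
  subst hk; subst hp; rfl

theorem goA_eq_goB (line : String) (k : Nat) (hk : k ≤ line.toList.length)
    (parts : List (Bool × String)) :
    goA line k hk parts = goB (line.toList.drop k) [] false parts := by
  have hstart : PySem.Str.findFrom line "\\f " (k : Int) =
      (if PySem.Chars.find (line.toList.drop k) ['\\','f',' '] = -1 then -1
       else (k : Int) + PySem.Chars.find (line.toList.drop k) ['\\','f',' ']) := by
    simpa using PySem.Chars.findFrom_natCast line.toList ['\\','f',' '] k hk
  rw [goB_normal]
  by_cases hA : PySem.Chars.find (line.toList.drop k) ['\\','f',' '] = -1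
  · rw [goA]
    simp only [hstart, hA, reduceIte, List.nil_append]
    simp [slice_from_eq]
  · -- a footnote start was found at index k + j
    have hj0 : 0 ≤ PySem.Chars.find (line.toList.drop k) ['\\','f',' '] := by
      have := PySem.Chars.neg_one_le_find (line.toList.drop k) ['\\','f',' ']; omega
    set j := PySem.Chars.find (line.toList.drop k) ['\\','f',' '] with hjdef
    obtain ⟨hjpre, -⟩ := PySem.Chars.find_spec (s := line.toList.drop k) (sub := ['\\','f',' ']) hj0
    rw [List.drop_drop, ← hjdef] at hjpre
    obtain ⟨t, ht⟩ := hjpre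
    have hdk : k + j.toNat ≤ line.toList.length := by
      by_contra hcon
      have hnil : line.toList.drop (k + j.toNat) = [] := List.drop_eq_nil_of_le (by omega)
      rw [hnil] at ht; simp at ht
    have hlen3 : k + j.toNat + 3 + t.length = line.toList.length := by
      have hlen := congrArg List.length ht
      simp only [List.length_append, List.length_drop, List.length_cons, List.length_nil] at hlen
      omega
    have hne : ¬ ((k : Int) + j = -1) := by omega
    have hcast : (k : Int) + j = ((k + j.toNat : Nat) : Int) := by push_cast; omega
    have hdropkj : line.toList.drop (k + j.toNat) = '\\' :: 'f' :: ' ' :: t := by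
      simpa using ht.symm
    have hdropkj3 : line.toList.drop (k + j.toNat + 3) = t := by
      have h3 := congrArg (List.drop 3) hdropkj
      rw [List.drop_drop] at h3
      simpa [show k + j.toNat + 3 = 3 + (k + j.toNat) from by omega] using h3
    have he : PySem.Str.findFrom line "\\f*" ((k : Int) + j) =
        (if PySem.Chars.find t ['\\','f','*'] = -1 then -1
         else ((k + j.toNat : Nat) : Int) + (PySem.Chars.find t ['\\','f','*'] + 3)) := by
      rw [hcast]
      have hff := PySem.Chars.findFrom_natCast line.toList ['\\','f','*'] (k + j.toNat) (by omega)
      rw [hdropkj, find_fc_after_fo] at hff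
      by_cases hB : PySem.Chars.find t ['\\','f','*'] = -1
      · simpa [hB] using hff
      · have hm0 := PySem.Chars.neg_one_le_find t ['\\','f','*']
        rw [if_neg hB] at hff ⊢
        rw [if_neg (by omega)] at hff
        simpa using hff
    rw [if_neg hA]
    have hdrop3 : (line.toList.drop k).drop (j.toNat + 3) = t := by
      rw [List.drop_drop, show k + (j.toNat + 3) = k + j.toNat + 3 from by omega, hdropkj3]
    rw [hdrop3, goB_footnote]
    have htake_eq : (line.toList.drop k).take j.toNat = [] ↔ ¬ ((k : Int) < (k : Int) + j) := by
      rw [List.take_eq_nil_iff]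
      constructor
      · rintro (h | h)
        · omega
        · exfalso
          have := congrArg List.length h
          simp only [List.length_drop, List.length_nil] at this
          omega
      · intro h; left; omega
    have hparts : ∀ x : Bool × String,
        (if (k : Int) < (k : Int) + j then
            parts ++ [(false, PySem.Str.slice line (some (k : Int)) (some ((k : Int) + j)))]
          else parts) ++ [x] =
        (if [] ++ (line.toList.drop k).take j.toNat = [] then parts
          else parts ++ [(false, String.ofList ([] ++ (line.toList.drop k).take j.toNat))]) ++ [x] := by
      intro x
      rw [hcast, slice_between_eq, show k + j.toNat - k = j.toNat from by omega]
      simp only [List.nil_append]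
      by_cases hz : (line.toList.drop k).take j.toNat = []
      · rw [if_pos hz, if_neg (by rw [← hcast]; exact htake_eq.mp hz)]
      · rw [if_neg hz, if_pos (by rw [← hcast]; by_contra hcon; exact hz (htake_eq.mpr hcon))]
    by_cases hB : PySem.Chars.find t ['\\','f','*'] = -1
    · -- unterminated footnote: both emit the rest of the line and stop
      rw [if_pos hB, goA]
      simp only [hstart, if_neg hA]
      rw [dif_neg hne, dif_pos (show PySem.Str.findFrom line "\\f*" ((k : Int) + j) = -1 by
        rw [he, if_pos hB])]
      have hsegU : PySem.Str.slice line (some ((k : Int) + j)) none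
          = String.ofList ('\\' :: 'f' :: ' ' :: t) := by
        rw [hcast, slice_from_eq, hdropkj]
      rw [hsegU, hparts]
      simp
    · -- terminated footnote: A loops from end+3, B keeps scanning after \f*
      have hm0 : 0 ≤ PySem.Chars.find t ['\\','f','*'] := by
        have := PySem.Chars.neg_one_le_find t ['\\','f','*']; omega
      set m := PySem.Chars.find t ['\\','f','*'] with hmdef
      obtain ⟨hmpre, -⟩ := PySem.Chars.find_spec (s := t) (sub := ['\\','f','*']) hm0
      rw [← hmdef] at hmpre
      have hmt : m.toNat ≤ t.length := by
        by_contra hcon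
        have hnil : t.drop m.toNat = [] := List.drop_eq_nil_of_le (by omega)
        rw [hnil] at hmpre; simp at hmpre
      have hmlen : m.toNat + 3 ≤ t.length := by
        have hl := hmpre.length_le
        simp only [List.length_drop, List.length_cons, List.length_nil] at hl
        omega
      obtain ⟨u, hu⟩ := hmpre
      have htdrop : t.drop (m.toNat + 3) = u := by
        have h3 := congrArg (List.drop 3) hu.symm
        rw [List.drop_drop] at h3
        simpa [show m.toNat + 3 = 3 + m.toNat from by omega] using h3
      have httake : t.take (m.toNat + 3) = t.take m.toNat ++ ['\\','f','*'] := by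
        conv_lhs => rw [← List.take_append_drop m.toNat t, ← hu]
        rw [show m.toNat + 3 = (t.take m.toNat).length + 3 from by
          simp [List.length_take]; omega]
        rw [List.take_length_add_append]
        simp
      have hene : ¬ (PySem.Str.findFrom line "\\f*" ((k : Int) + j) = -1) := by
        rw [he, if_neg hB]; omega
      rw [if_neg hB, goA]
      simp only [hstart, if_neg hA]
      rw [dif_neg hne, dif_neg hene]
      have hfin : (PySem.Str.findFrom line "\\f*" ((k : Int) + j) + 3).toNat
          = k + j.toNat + m.toNat + 6 := by
        rw [he, if_neg hB]; omega
      have hk' : k + j.toNat + m.toNat + 6 ≤ line.toList.length := by omega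
      have hseg2 : PySem.Str.slice line (some ((k : Int) + j))
            (some (PySem.Str.findFrom line "\\f*" ((k : Int) + j) + 3)) =
          String.ofList (['\\','f',' '] ++ t.take (m.toNat + 3)) := by
        rw [he, if_neg hB, hcast]
        rw [show ((k + j.toNat : Nat) : Int) + (m + 3) + 3
              = ((k + j.toNat + m.toNat + 6 : Nat) : Int) from by omega]
        rw [slice_between_eq,
            show k + j.toNat + m.toNat + 6 - (k + j.toNat) = m.toNat + 6 from by omega,
            hdropkj]
        rw [show ('\\' :: 'f' :: ' ' :: t) = ['\\','f',' '] ++ t from rfl]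
        rw [show m.toNat + 6 = ['\\','f',' '].length + (m.toNat + 3) from by simp only [List.length_cons, List.length_nil]; omega]
        rw [List.take_length_add_append]
      rw [goA_congr line _ (k + j.toNat + m.toNat + 6) _ hk' _
            ((if [] ++ (line.toList.drop k).take j.toNat = [] then parts
              else parts ++ [(false, String.ofList ([] ++ (line.toList.drop k).take j.toNat))])
              ++ [(true, String.ofList (['\\','f',' '] ++ t.take (m.toNat + 3)))])
            hfin (by rw [hseg2, hparts])]
      rw [goA_eq_goB]
      have hfinal : line.toList.drop (k + j.toNat + m.toNat + 6) = t.drop (m.toNat + 3) := by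
        have h6 := congrArg (List.drop (m.toNat + 3)) hdropkj3
        rw [List.drop_drop] at h6
        simpa [show k + j.toNat + m.toNat + 6 = k + j.toNat + 3 + (m.toNat + 3) from by omega]
          using h6
      rw [hfinal]
  termination_by line.toList.length - k
  decreasing_by omega

-- ===== VERDICT (by name: the statement is the Claim_ definition above) =====
theorem split_preserving_footnotes_spec : Claim_equal_split_preserving_footnotes := by
  intro line _
  unfold Spec_split_preserving_footnotes split_preserving_footnotes split_preserving_footnotes_alt
  simpa using goA_eq_goB line 0 (Nat.zero_le _) []
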